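-- pv_equiv track=rewrite | github.com/huggin/gfg | bit/even_subsets.py | countSumSubsets
-- ===== SOURCE A (Python) =====
-- def countSumSubsets(arr, N):
--     # Code here
--     ans = 0
--     for i in range(1, 1 << N):
--         total = 0
--         for j in range(N):
--             if i & (1 << j):
--                 total += arr[j]
--
--         if total % 2 == 0:
--             ans += 1
--
--     return ans
-- ===== SOURCE B (Python) =====
-- def countSumSubsets(arr, N):
--     # closed form: among the 2^N subset masks, exactly half have even sum
--     # when some selected element is odd, and all of them do otherwise;
--     # subtract 1 for the empty subset.
--     if any(x % 2 != 0 for x in arr[:N]):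
--         return (1 << (N - 1)) - 1
--     return (1 << N) - 1
-- ===== Notes on version B (the rewrite author's own statement) =====
-- stated objective: faster
-- what changed: B replaces A's enumeration of all 2^N subset masks (recomputing each subset sum bit by bit) with the closed form 2^(N-1)-1 when arr[:N] contains an odd element and 2^N-1 otherwise.
import Mathlib
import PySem

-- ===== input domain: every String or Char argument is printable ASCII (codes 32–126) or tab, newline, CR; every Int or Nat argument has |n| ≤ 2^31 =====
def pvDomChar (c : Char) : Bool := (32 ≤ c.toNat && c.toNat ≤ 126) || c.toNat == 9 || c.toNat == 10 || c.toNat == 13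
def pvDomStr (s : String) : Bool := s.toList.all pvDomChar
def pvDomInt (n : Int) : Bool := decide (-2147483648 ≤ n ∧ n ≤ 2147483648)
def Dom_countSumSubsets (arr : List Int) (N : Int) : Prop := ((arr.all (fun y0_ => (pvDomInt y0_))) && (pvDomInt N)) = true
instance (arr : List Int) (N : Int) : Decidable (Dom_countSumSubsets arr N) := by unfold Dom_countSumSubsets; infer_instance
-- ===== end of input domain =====

-- B replaces A's 2^N·N subset-mask enumeration by the closed form
-- 2^(N-1)-1 (some element of arr[:N] odd) / 2^N-1 (all even): asymptotically faster.

-- ===== PORT A =====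
def countSumSubsets (arr : List Int) (N : Int) : Int :=
  (PySem.List.pyRange 1 ((1 : Int) <<< N.toNat) 1).foldl (fun ans i =>
    let total : Int := (PySem.List.pyRange 0 N 1).foldl (fun total j =>
      if PySem.Int.band i ((1 : Int) <<< j.toNat) ≠ 0 then total + PySem.List.pyGetD arr j 0
      else total) 0
    if PySem.Int.mod total 2 = 0 then ans + 1 else ans) 0

-- ===== PORT B =====
def countSumSubsets_alt (arr : List Int) (N : Int) : Int :=
  if (PySem.List.slice arr none (some N)).any (fun x => PySem.Int.mod x 2 ≠ 0) then
    ((1 : Int) <<< (N - 1).toNat) - 1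
  else
    ((1 : Int) <<< N.toNat) - 1

-- ===== PRECONDITION & SPEC =====
-- Python A raises ValueError for N < 0 (negative shift) and IndexError for N > len(arr); exactly those are excluded.
def Pre_countSumSubsets (arr : List Int) (N : Int) : Prop := 0 ≤ N ∧ N ≤ (arr.length : Int)
instance (arr : List Int) (N : Int) : Decidable (Pre_countSumSubsets arr N) := by unfold Pre_countSumSubsets; infer_instance
def pvWitness_countSumSubsets : List Int × Int := ([1, 2, 3], 3)

def Spec_countSumSubsets (arr : List Int) (N : Int) (out : Int) : Prop := out = countSumSubsets_alt arr N
instance (arr : List Int) (N : Int) (out : Int) : Decidable (Spec_countSumSubsets arr N out) := by unfold Spec_countSumSubsets; infer_instance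

-- ===== CLAIM (what is proved, stated in full; the proofs are below) =====
def Claim_equal_countSumSubsets : Prop := ∀ (arr : List Int) (N : Int), Dom_countSumSubsets arr N → Pre_countSumSubsets arr N → Spec_countSumSubsets arr N (countSumSubsets arr N)

-- ===== LEMMAS AND PROOFS =====

def bsum : List Int → Nat → Int
  | [], _ => 0
  | x :: xs, m => (if m % 2 = 1 then x else 0) + bsum xs (m / 2)

theorem bsum_nil (m : Nat) : bsum [] m = 0 := rfl

theorem bsum_zero (xs : List Int) : bsum xs 0 = 0 := by
  induction xs with
  | nil => rfl
  | cons x xs ih => simp [bsum, ih]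

theorem bsum_append (xs : List Int) (x : Int) (m : Nat) :
    bsum (xs ++ [x]) m = bsum xs m + (if m.testBit xs.length then x else 0) := by
  induction xs generalizing m with
  | nil =>
    simp [bsum, Nat.testBit_zero]
  | cons y ys ih =>
    simp only [List.cons_append, bsum, ih, List.length_cons]
    rw [Nat.testBit_div_two]
    exact (add_assoc _ _ _).symm

theorem bsum_high (xs : List Int) (m k : Nat) (h : xs.length ≤ k) :
    bsum xs (2 ^ k + m) = bsum xs m := by
  induction xs generalizing m k with
  | nil => rfl
  | cons y ys ih =>
    simp only [List.length_cons] at h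
    obtain ⟨k', rfl⟩ : ∃ k', k = k' + 1 := ⟨k - 1, by omega⟩
    have h2 : 2 ^ (k' + 1) + m = 2 * (2 ^ k') + m := by rw [pow_succ]; ring
    simp only [bsum, h2]
    have hm : (2 * 2 ^ k' + m) % 2 = m % 2 := by omega
    have hd : (2 * 2 ^ k' + m) / 2 = 2 ^ k' + m / 2 := by omega
    rw [hm, hd, ih _ _ (by omega)]

theorem shiftl_int (k : Nat) : (1 : Int) <<< ((k : Int)) = ((2 ^ k : Nat) : Int) := by
  rw [show ((1 : Int)) = ((1 : Nat) : Int) by norm_num, Int.shiftLeft_natCast]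
  norm_num [Nat.shiftLeft_eq]

theorem inner_eq (arr : List Int) (n : Nat) (hn : n ≤ arr.length) (m : Nat) :
    (PySem.List.pyRange 0 (n : Int) 1).foldl (fun total j =>
      if PySem.Int.band (m : Int) ((1 : Int) <<< j.toNat) ≠ 0 then total + PySem.List.pyGetD arr j 0
      else total) 0 = bsum (arr.take n) m := by
  induction n with
  | zero => simp [PySem.List.pyRange_one_eq_nil, bsum_nil]
  | succ n ih =>
    have hcast : ((n + 1 : Nat) : Int) = (n : Int) + 1 := by push_cast; ring
    rw [hcast, PySem.List.pyRange_one_succ_right (by positivity), List.foldl_append]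
    rw [ih (by omega)]
    have hget : PySem.List.pyGetD arr ((n : Nat) : Int) 0 = arr[n]'(by omega) :=
      PySem.List.pyGetD_ofNat arr n 0 (by omega)
    have hband : PySem.Int.band (m : Int) ((1 : Int) <<< ((((n : Int)).toNat : Nat) : Int)) = ((m &&& 2 ^ n : Nat) : Int) := by
      rw [Int.toNat_natCast, shiftl_int, PySem.Int.band_natCast]
    have htake : arr.take (n + 1) = arr.take n ++ [arr[n]'(by omega)] := by
      rw [← List.take_concat_get (show n < arr.length by omega), List.concat_eq_append]
    rw [htake, bsum_append, List.length_take_of_le (by omega)]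
    simp only [List.foldl_cons, List.foldl_nil]
    rw [hband, hget]
    have hcond : ((m &&& 2 ^ n : Nat) = 0) ↔ ¬ m.testBit n := by
      rw [Nat.and_two_pow]
      rcases h : m.testBit n <;> simp
    by_cases hb : m.testBit n <;> simp [hb, hcond]

def evenCnt (xs : List Int) : Nat :=
  (List.range (2 ^ xs.length)).countP (fun m => bsum xs m % 2 = 0)

theorem evenCnt_closed (xs : List Int) :
    evenCnt xs = if xs.any (fun x => x % 2 ≠ 0) then 2 ^ (xs.length - 1) else 2 ^ xs.length := by
  induction xs using List.reverseRecOn with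
  | nil => simp [evenCnt, bsum]
  | append_singleton xs x ih =>
    have hsplit : List.range (2 ^ (xs ++ [x]).length)
        = List.range (2 ^ xs.length) ++ (List.range (2 ^ xs.length)).map (fun k => 2 ^ xs.length + k) := by
      rw [← List.range_add]; congr 1
      simp [List.length_append, pow_succ]; ring
    have hlow : ∀ m ∈ List.range (2 ^ xs.length),
        (decide (bsum (xs ++ [x]) m % 2 = 0)) = decide (bsum xs m % 2 = 0) := by
      intro m hm
      rw [List.mem_range] at hm
      rw [bsum_append, Nat.testBit_lt_two_pow hm]
      simp
    have hhigh : ∀ m ∈ List.range (2 ^ xs.length),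
        (decide (bsum (xs ++ [x]) (2 ^ xs.length + m) % 2 = 0)) = decide ((bsum xs m + x) % 2 = 0) := by
      intro m hm
      rw [List.mem_range] at hm
      rw [bsum_append, bsum_high xs m xs.length le_rfl,
          Nat.testBit_two_pow_add_eq, Nat.testBit_lt_two_pow hm]
      simp
    have hcnt : evenCnt (xs ++ [x])
        = evenCnt xs + (List.range (2 ^ xs.length)).countP (fun m => (bsum xs m + x) % 2 = 0) := by
      unfold evenCnt
      rw [hsplit, List.countP_append, List.countP_map]
      congr 1
      · exact List.countP_congr (by intro m hm; rw [hlow m hm])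
      · exact List.countP_congr (by intro m hm; rw [Function.comp_apply, hhigh m hm])
    have hle : evenCnt xs ≤ 2 ^ xs.length := by
      unfold evenCnt
      exact le_trans List.countP_le_length (le_of_eq List.length_range)
    by_cases hx : x % 2 = 0
    · have hsame : (List.range (2 ^ xs.length)).countP (fun m => (bsum xs m + x) % 2 = 0)
          = evenCnt xs := by
        unfold evenCnt
        refine List.countP_congr ?_
        intro m _; constructor <;> (intro h; simp only [decide_eq_true_eq] at *; omega)
      by_cases ha : xs.any (fun y => y % 2 ≠ 0) = true
      · have hne : xs ≠ [] := by rintro rfl; simp at ha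
        have hA : (xs ++ [x]).any (fun y => y % 2 ≠ 0) = true := by
          simp only [List.any_append, ha, Bool.true_or]
        have hL : (xs ++ [x]).length - 1 = xs.length := by simp
        have hlen : 1 ≤ xs.length := List.length_pos_of_ne_nil hne
        rw [hcnt, hsame, ih, ha, if_pos rfl, hA, if_pos rfl, hL, ← two_mul, ← pow_succ']
        congr 1
        omega
      · have ha' : xs.any (fun y => decide (y % 2 ≠ 0)) = false := by
          simpa using ha
        have hA : (xs ++ [x]).any (fun y => y % 2 ≠ 0) = false := by
          rw [List.any_append, ha']
          simp [hx]
        rw [hcnt, hsame, ih, ha', if_neg (by simp), hA, if_neg (by simp), ← two_mul, ← pow_succ']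
        simp
    · have key : (List.range (2 ^ xs.length)).countP (fun m => (bsum xs m + x) % 2 = 0)
          + evenCnt xs = 2 ^ xs.length := by
        have h2 := List.length_eq_countP_add_countP (fun m => decide ((bsum xs m + x) % 2 = 0))
          (l := List.range (2 ^ xs.length))
        rw [List.length_range] at h2
        have hc : (List.range (2 ^ xs.length)).countP
            (fun a => decide ¬ decide ((bsum xs a + x) % 2 = 0) = true) = evenCnt xs := by
          unfold evenCnt
          refine List.countP_congr ?_
          intro m _
          simp only [decide_eq_true_eq]
          constructor <;> (intro h; omega)
        omega
      have hA : (xs ++ [x]).any (fun y => y % 2 ≠ 0) = true := by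
        rw [List.any_append]
        simp
        exact Or.inr (by omega)
      have hL : (xs ++ [x]).length - 1 = xs.length := by simp
      rw [hcnt, hA, if_pos rfl, hL]
      omega

theorem shiftl_int_nat (k : Nat) : (1 : Int) <<< k = ((2 ^ k : Nat) : Int) := by
  rw [Int.shiftLeft_eq]; push_cast; ring

-- A equals evenCnt (arr.take n) - 1 on the precondition
theorem countSumSubsets_eq_evenCnt (arr : List Int) (N : Int) (h0 : 0 ≤ N)
    (hlen : N ≤ (arr.length : Int)) :
    countSumSubsets arr N = (evenCnt (arr.take N.toNat) : Int) - 1 := by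
  unfold countSumSubsets
  set n := N.toNat with hn
  have hN : N = (n : Int) := by omega
  have hpos : (0 : Int) < (1 : Int) <<< n := by
    rw [shiftl_int_nat]; positivity
  have hfun : (fun (ans i : Int) =>
      let total : Int := (PySem.List.pyRange 0 N 1).foldl (fun total j =>
        if PySem.Int.band i ((1 : Int) <<< j.toNat) ≠ 0 then total + PySem.List.pyGetD arr j 0
        else total) 0
      if PySem.Int.mod total 2 = 0 then ans + 1 else ans)
      = (fun ans i => if (fun (i : Int) => decide (PySem.Int.mod
          ((PySem.List.pyRange 0 N 1).foldl (fun total j =>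
            if PySem.Int.band i ((1 : Int) <<< j.toNat) ≠ 0 then total + PySem.List.pyGetD arr j 0
            else total) 0) 2 = 0)) i = true then ans + 1 else ans) := by
    funext ans i; simp
  rw [hfun, PySem.List.foldl_count_if]
  have hcons := PySem.List.pyRange_one_cons (a := 0) (b := (1 : Int) <<< n) hpos
  have hcount0 : (PySem.List.pyRange 0 ((1 : Int) <<< n) 1).countP
      (fun i => decide (PySem.Int.mod
        ((PySem.List.pyRange 0 N 1).foldl (fun total j =>
          if PySem.Int.band i ((1 : Int) <<< j.toNat) ≠ 0 then total + PySem.List.pyGetD arr j 0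
          else total) 0) 2 = 0)) = evenCnt (arr.take n) := by
    rw [shiftl_int_nat, PySem.List.pyRange_zero_nat, List.countP_map]
    unfold evenCnt
    rw [List.length_take_of_le (by omega)]
    refine List.countP_congr ?_
    intro m _
    simp only [Function.comp_apply, decide_eq_true_eq]
    rw [hN, inner_eq arr n (by omega) m, PySem.Int.mod_eq_emod_of_pos (by norm_num)]
  rw [hcons] at hcount0
  have hinner0 : ((PySem.List.pyRange 0 N 1).foldl (fun total j =>
      if PySem.Int.band (0 : Int) ((1 : Int) <<< j.toNat) ≠ 0 then total + PySem.List.pyGetD arr j 0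
      else total) 0) = 0 := by
    have := inner_eq arr n (by omega) 0
    rw [← hN] at this
    simp only [Nat.cast_zero] at this
    rw [this, bsum_zero]
  rw [List.countP_cons] at hcount0
  simp only [hinner0] at hcount0
  have hif : (if decide (PySem.Int.mod (0 : Int) 2 = 0) = true then (1 : Nat) else 0) = 1 := by
    have hm0 : PySem.Int.mod (0 : Int) 2 = 0 := by
      rw [PySem.Int.mod_eq_emod_of_pos (by norm_num)]; norm_num
    rw [hm0]
    norm_num
  rw [hif] at hcount0
  rw [show ((0 : Int) + 1) = 1 from by norm_num] at hcount0
  omega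

-- ===== VERDICT (by name: the statement is the Claim_ definition above) =====
theorem countSumSubsets_spec : Claim_equal_countSumSubsets := by
  intro arr N _ hpre
  obtain ⟨h0, hlen⟩ := hpre
  unfold Spec_countSumSubsets countSumSubsets_alt
  set n := N.toNat with hn
  have hN : N = (n : Int) := by omega
  rw [countSumSubsets_eq_evenCnt arr N h0 hlen]
  have hslice : PySem.List.slice arr none (some N) = arr.take n :=
    PySem.List.slice_to arr h0
  have hany : (PySem.List.slice arr none (some N)).any (fun x => PySem.Int.mod x 2 ≠ 0)
      = (arr.take n).any (fun x => x % 2 ≠ 0) := by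
    rw [hslice]
    refine List.any_congr rfl fun x => ?_
    rw [PySem.Int.mod_eq_emod_of_pos (by norm_num)]
  rw [hany]
  have hclosed := evenCnt_closed (arr.take n)
  have hlent : (arr.take n).length = n := List.length_take_of_le (by omega)
  rw [hlent] at hclosed
  by_cases ha : (arr.take n).any (fun x => x % 2 ≠ 0) = true
  · have hne : (arr.take n) ≠ [] := by rintro h; rw [h] at ha; simp at ha
    have hnpos : 1 ≤ n := by
      have := List.length_pos_of_ne_nil hne; omega
    rw [ha, if_pos rfl] at hclosed
    rw [if_pos ha, hclosed, shiftl_int_nat]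
    have h1 : (N - 1).toNat = n - 1 := by omega
    rw [h1]
  · have ha' : ((arr.take n).any (fun x => x % 2 ≠ 0)) = false := by simpa using ha
    rw [ha', if_neg (by simp)] at hclosed
    rw [if_neg (by rw [ha']; simp), hclosed, shiftl_int_nat]
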